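-- pv_equiv track=rewrite | github.com/ymote/harmony-android-guide | scripts/generate_per_api_skills.py | stub_strategy
-- ===== SOURCE A (Python) =====
-- def stub_strategy(api):
--     name = api['name'].lower()
--     if any(w in name for w in ['create', 'open', 'init', 'start', 'connect']):
--         return 'Return dummy instance / no-op'
--     if any(w in name for w in ['destroy', 'close', 'stop', 'release', 'disconnect']):
--         return 'No-op'
--     if any(w in name for w in ['get', 'is', 'has', 'can', 'find', 'query', 'read']):
--         return 'Return safe default (null/false/0/empty)'
--     if any(w in name for w in ['set', 'put', 'write', 'add', 'remove', 'update']):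
--         return 'Log warning + no-op'
--     if any(w in name for w in ['on', 'register', 'listen', 'subscribe']):
--         return 'Store callback, never fire'
--     return 'throw UnsupportedOperationException'
-- ===== SOURCE B (Python) =====
-- # String-driven scan: walk the name once, at each position match keywords and keep
-- # the minimum rule priority; index a strategy table at the end (vs A's rule-driven cascade).
-- _KEYWORD_PRIORITY = {
--     'create': 0, 'open': 0, 'init': 0, 'start': 0, 'connect': 0,
--     'destroy': 1, 'close': 1, 'stop': 1, 'release': 1, 'disconnect': 1,
--     'get': 2, 'is': 2, 'has': 2, 'can': 2, 'find': 2, 'query': 2, 'read': 2,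
--     'set': 3, 'put': 3, 'write': 3, 'add': 3, 'remove': 3, 'update': 3,
--     'on': 4, 'register': 4, 'listen': 4, 'subscribe': 4,
-- }
-- _STRATEGIES = [
--     'Return dummy instance / no-op',
--     'No-op',
--     'Return safe default (null/false/0/empty)',
--     'Log warning + no-op',
--     'Store callback, never fire',
--     'throw UnsupportedOperationException',
-- ]
--
-- def stub_strategy(api):
--     name = api['name'].lower()
--     best = 5
--     for i in range(len(name)):
--         for kw, p in _KEYWORD_PRIORITY.items():
--             if p < best and name.startswith(kw, i):
--                 best = p
--     return _STRATEGIES[best]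
-- ===== Notes on version B (the rewrite author's own statement) =====
-- stated objective: alternative
-- what changed: Replaces A's rule-driven if-cascade of per-group substring scans with a single string-driven pass: walk the name's positions once, match keywords starting at each position against a keyword-to-priority dict keeping the minimum priority, then index a strategy table (first-matching group = minimum priority among all substring matches).
import Mathlib
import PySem

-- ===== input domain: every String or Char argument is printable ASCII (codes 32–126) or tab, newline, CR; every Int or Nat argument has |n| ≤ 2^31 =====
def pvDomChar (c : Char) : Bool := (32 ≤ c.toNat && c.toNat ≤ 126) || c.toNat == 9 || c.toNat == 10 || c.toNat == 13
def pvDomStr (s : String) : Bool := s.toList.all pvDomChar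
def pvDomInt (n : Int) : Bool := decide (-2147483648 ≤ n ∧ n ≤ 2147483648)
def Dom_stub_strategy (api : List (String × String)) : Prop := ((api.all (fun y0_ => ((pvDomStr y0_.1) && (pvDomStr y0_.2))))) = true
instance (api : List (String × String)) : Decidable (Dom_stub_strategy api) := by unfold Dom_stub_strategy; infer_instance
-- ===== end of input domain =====

-- B replaces A's rule-driven if-cascade by a single string-driven scan: walk the name's
-- positions once, keep the minimum matching rule priority, and index a strategy table (objective: alternative).


-- ===== PORT A =====
-- api['name'] raises KeyError when absent (excluded by Pre_); port uses getD "" there (unclaimed).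
def stub_strategy (api : List (String × String)) : String :=
  let name := PySem.Str.lower (((PySem.Dict.ofList api).get? "name").getD "")
  if ["create", "open", "init", "start", "connect"].any (fun w => PySem.Str.isIn w name) then
    "Return dummy instance / no-op"
  else if ["destroy", "close", "stop", "release", "disconnect"].any (fun w => PySem.Str.isIn w name) then
    "No-op"
  else if ["get", "is", "has", "can", "find", "query", "read"].any (fun w => PySem.Str.isIn w name) then
    "Return safe default (null/false/0/empty)"
  else if ["set", "put", "write", "add", "remove", "update"].any (fun w => PySem.Str.isIn w name) then
    "Log warning + no-op"
  else if ["on", "register", "listen", "subscribe"].any (fun w => PySem.Str.isIn w name) then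
    "Store callback, never fire"
  else
    "throw UnsupportedOperationException"

-- ===== PORT B =====
-- _KEYWORD_PRIORITY.items() of Source B, in insertion order
def pvKw : List (String × Nat) :=
  [("create", 0), ("open", 0), ("init", 0), ("start", 0), ("connect", 0),
   ("destroy", 1), ("close", 1), ("stop", 1), ("release", 1), ("disconnect", 1),
   ("get", 2), ("is", 2), ("has", 2), ("can", 2), ("find", 2), ("query", 2), ("read", 2),
   ("set", 3), ("put", 3), ("write", 3), ("add", 3), ("remove", 3), ("update", 3),
   ("on", 4), ("register", 4), ("listen", 4), ("subscribe", 4)]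

-- _STRATEGIES of Source B
def pvStrats : List String :=
  ["Return dummy instance / no-op", "No-op", "Return safe default (null/false/0/empty)",
   "Log warning + no-op", "Store callback, never fire", "throw UnsupportedOperationException"]

-- inner loop at one position i: name.startswith(kw, i) = kw.toList.isPrefixOf (suffix at i)
def pvStep (s : List Char) (best : Nat) : Nat :=
  pvKw.foldl (fun b kp => if kp.2 < b && kp.1.toList.isPrefixOf s then kp.2 else b) best

-- outer loop over positions i = 0 .. len(name)-1, i.e. over the suffixes of name
def pvScan : List Char → Nat → Nat
  | [], best => best
  | c :: rest, best => pvScan rest (pvStep (c :: rest) best)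

def stub_strategy_alt (api : List (String × String)) : String :=
  let name := PySem.Str.lower (((PySem.Dict.ofList api).get? "name").getD "")
  pvStrats.getD (pvScan name.toList 5) ""

-- ===== PRECONDITION & SPEC =====
-- Pre_ excludes inputs with no 'name' key, where A raises KeyError.
def Pre_stub_strategy (api : List (String × String)) : Prop :=
  (PySem.Dict.ofList api).get? "name" ≠ none
instance (api : List (String × String)) : Decidable (Pre_stub_strategy api) := by unfold Pre_stub_strategy; infer_instance

def pvWitness_stub_strategy : (List (String × String)) := [("name", "openCamera")]

def Spec_stub_strategy (api : List (String × String)) (out : String) : Prop := out = stub_strategy_alt api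
instance (api : List (String × String)) (out : String) : Decidable (Spec_stub_strategy api out) := by unfold Spec_stub_strategy; infer_instance

-- ===== CLAIM =====
def Claim_equal_stub_strategy : Prop := ∀ (api : List (String × String)), Dom_stub_strategy api → Pre_stub_strategy api → Spec_stub_strategy api (stub_strategy api)

-- ===== LEMMAS AND PROOFS =====
-- min-accumulator over the priorities whose condition holds
def pvVal (K : List (String × Nat)) (c : String × Nat → Bool) (b : Nat) : Nat :=
  (K.filter c).foldl (fun acc kp => min acc kp.2) b

theorem pvVal_le (K : List (String × Nat)) (c : String × Nat → Bool) (b : Nat) :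
    pvVal K c b ≤ b := by
  induction K generalizing b with
  | nil => simp [pvVal]
  | cons h t ih =>
    by_cases hc : c h
    · calc pvVal (h :: t) c b = pvVal t c (min b h.2) := by simp [pvVal, hc]
        _ ≤ min b h.2 := ih _
        _ ≤ b := Nat.min_le_left _ _
    · simpa [pvVal, hc] using ih b

theorem pvVal_min (K : List (String × Nat)) (c : String × Nat → Bool) (a b : Nat) :
    pvVal K c (min a b) = min (pvVal K c a) b := by
  induction K generalizing a with
  | nil => simp [pvVal]
  | cons h t ih =>
    by_cases hc : c h
    · have : min (min a b) h.2 = min (min a h.2) b := by omega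
      simp only [pvVal, List.filter_cons, hc, if_pos, List.foldl_cons]
      simpa [this] using ih (min a h.2)
    · simpa [pvVal, hc] using ih a

-- the guarded if-update loop body equals the min-accumulator
theorem pvIf_eq (K : List (String × Nat)) (c : String × Nat → Bool) (b : Nat) :
    K.foldl (fun b kp => if kp.2 < b && c kp then kp.2 else b) b = pvVal K c b := by
  induction K generalizing b with
  | nil => simp [pvVal]
  | cons h t ih =>
    rw [List.foldl_cons, ih]
    by_cases hc : c h = true
    · have hacc : (if (decide (h.2 < b) && c h) = true then h.2 else b) = min b h.2 := by
        rw [hc]; simp only [Bool.and_true, decide_eq_true_eq]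
        split_ifs <;> omega
      rw [hacc]
      simp [pvVal, hc]
    · have hacc : (if (decide (h.2 < b) && c h) = true then h.2 else b) = b := by
        simp [hc]
      rw [hacc]
      simp [pvVal, hc]

-- scanning for p-matches then q-matches = scanning for (p or q)-matches
theorem pvVal_or (K : List (String × Nat)) (p q : String × Nat → Bool) (b : Nat) :
    pvVal K (fun kp => p kp || q kp) b = pvVal K q (pvVal K p b) := by
  induction K generalizing b with
  | nil => simp [pvVal]
  | cons h t ih =>
    by_cases hp : p h = true <;> by_cases hq : q h = true
    · have h1 : pvVal (h :: t) (fun kp => p kp || q kp) b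
          = pvVal t (fun kp => p kp || q kp) (min b h.2) := by
        simp [pvVal, hp]
      have h2 : pvVal (h :: t) q (pvVal (h :: t) p b)
          = pvVal t q (min (pvVal t p (min b h.2)) h.2) := by
        simp [pvVal, hp, hq]
      rw [h1, ih, h2,
        Nat.min_eq_left (le_trans (pvVal_le _ _ _) (Nat.min_le_right _ _))]
    · have h1 : pvVal (h :: t) (fun kp => p kp || q kp) b
          = pvVal t (fun kp => p kp || q kp) (min b h.2) := by
        simp [pvVal, hp]
      have h2 : pvVal (h :: t) q (pvVal (h :: t) p b)
          = pvVal t q (pvVal t p (min b h.2)) := by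
        simp [pvVal, hp, hq]
      rw [h1, ih, h2]
    · have h1 : pvVal (h :: t) (fun kp => p kp || q kp) b
          = pvVal t (fun kp => p kp || q kp) (min b h.2) := by
        simp [pvVal, hp, hq]
      have h2 : pvVal (h :: t) q (pvVal (h :: t) p b)
          = pvVal t q (min (pvVal t p b) h.2) := by
        simp [pvVal, hp, hq]
      rw [h1, ih, h2, pvVal_min]
    · have e : List.filter (fun kp => p kp || q kp) (h :: t)
          = List.filter (fun kp => p kp || q kp) t := by
        simp [hp, hq]
      have ep : List.filter p (h :: t) = List.filter p t := by
        simp [hp]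
      have eq' : List.filter q (h :: t) = List.filter q t := by
        simp [hq]
      simp only [pvVal, e, ep, eq']
      simpa [pvVal] using ih b

theorem pvStep_eq (s : List Char) (b : Nat) :
    pvStep s b = pvVal pvKw (fun kp => kp.1.toList.isPrefixOf s) b := pvIf_eq _ _ _

-- substring test on c :: r splits into a prefix test at the head plus the test on r
theorem pvIsIn_cons (sub : List Char) (c : Char) (r : List Char) :
    PySem.Chars.isIn sub (c :: r) = (sub.isPrefixOf (c :: r) || PySem.Chars.isIn sub r) := by
  rw [Bool.eq_iff_iff]
  simp [PySem.Chars.isIn_iff_infix, List.infix_cons_iff, List.isPrefixOf_iff_prefix]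

theorem pvScan_eq (l : List Char) (b : Nat) :
    pvScan l b = pvVal pvKw (fun kp => PySem.Chars.isIn kp.1.toList l) b := by
  induction l generalizing b with
  | nil =>
    have hf : pvKw.filter (fun kp => PySem.Chars.isIn kp.1.toList []) = [] := by decide
    simp [pvScan, pvVal, hf]
  | cons c r ih =>
    have hfun : (fun kp : String × Nat => PySem.Chars.isIn kp.1.toList (c :: r))
        = fun kp => kp.1.toList.isPrefixOf (c :: r) || PySem.Chars.isIn kp.1.toList r := by
      funext kp; exact pvIsIn_cons _ _ _
    rw [pvScan, ih, pvStep_eq, ← pvVal_or, hfun]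

theorem pvVal_append (K1 K2 : List (String × Nat)) (c : String × Nat → Bool) (b : Nat) :
    pvVal (K1 ++ K2) c b = pvVal K2 c (pvVal K1 c b) := by
  simp [pvVal, List.filter_append, List.foldl_append]

-- one constant-priority group collapses to a single any() test
theorem pvVal_group (ws : List String) (i : Nat) (c : String × Nat → Bool) (b : Nat) :
    pvVal (ws.map (fun w => (w, i))) c b =
      if ws.any (fun w => c (w, i)) then min b i else b := by
  induction ws generalizing b with
  | nil => simp [pvVal]
  | cons w t ih =>
    by_cases hc : c (w, i)
    · have : pvVal ((w :: t).map (fun w => (w, i))) c b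
          = pvVal (t.map (fun w => (w, i))) c (min b i) := by simp [pvVal, hc]
      rw [this, ih]
      simp only [List.any_cons, hc, Bool.true_or, if_pos]
      split_ifs <;> omega
    · simp only [List.map_cons]
      have : pvVal ((w, i) :: t.map (fun w => (w, i))) c b
          = pvVal (t.map (fun w => (w, i))) c b := by simp [pvVal, hc]
      rw [this, ih]
      simp [hc]

-- ===== VERDICT =====
theorem stub_strategy_spec : Claim_equal_stub_strategy := by
  intro api _ _
  show stub_strategy api = stub_strategy_alt api
  simp only [stub_strategy, stub_strategy_alt]
  rw [pvScan_eq,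
    show pvKw =
      (["create", "open", "init", "start", "connect"].map (fun w => (w, 0))) ++
      ((["destroy", "close", "stop", "release", "disconnect"].map (fun w => (w, 1))) ++
      ((["get", "is", "has", "can", "find", "query", "read"].map (fun w => (w, 2))) ++
      ((["set", "put", "write", "add", "remove", "update"].map (fun w => (w, 3))) ++
      (["on", "register", "listen", "subscribe"].map (fun w => (w, 4)))))) from rfl]
  simp only [pvVal_append, pvVal_group, PySem.Str.isIn_eq]
  split_ifs <;> rfl
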